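-- pv_equiv track=rewrite | github.com/CoderFake/AIChatBot | api/workflows/langgraph/nodes/progress_tracker_node.py | _determine_next_action
-- ===== SOURCE A (Python) =====
-- from typing import Dict, Any, List, Optional
--
-- def _determine_next_action(formatted_tasks: List[Dict[str, Any]], current_step: str) -> str:
--     """
--     Determine the next workflow action based on task completion status
--     """
--     if not formatted_tasks:
--         return "final_response"
--
--     all_completed = all(task.get("status") == "completed" for task in formatted_tasks)
--     if all_completed:
--         return "final_response"
--
--     any_active = any(task.get("status") in ["pending", "in_progress", "retrying"] for task in formatted_tasks)
--     if any_active: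
--         return "continue_execution"
--
--     any_completed = any(task.get("status") == "completed" for task in formatted_tasks)
--     any_failed = any(task.get("status") == "failed" for task in formatted_tasks)
--
--     if any_completed:
--         return "final_response"
--     elif any_failed:
--         return "final_response"
--
--     return "continue_execution"
-- ===== SOURCE B (Python) =====
-- def _determine_next_action(formatted_tasks, current_step):
--     """Single pass: map each task to a severity rank, keep the running max, decode it."""
--     RANK = {"pending": 2, "in_progress": 2, "retrying": 2, "completed": 1, "failed": 1}
--     top = -1
--     for task in formatted_tasks:
--         r = RANK.get(task.get("status"), 0)
--         if r > top:
--             top = r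
--     if top == 2 or top == 0:
--         return "continue_execution"
--     return "final_response"
-- ===== Notes on version B (the rewrite author's own statement) =====
-- stated objective: alternative
-- what changed: B reduces the list in one fold to the maximum of a per-task severity rank (active=2, completed/failed=1, other=0, empty=-1) and decodes that single integer into the action, replacing A's empty-check plus four staged all/any scans with branching.
import Mathlib
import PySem

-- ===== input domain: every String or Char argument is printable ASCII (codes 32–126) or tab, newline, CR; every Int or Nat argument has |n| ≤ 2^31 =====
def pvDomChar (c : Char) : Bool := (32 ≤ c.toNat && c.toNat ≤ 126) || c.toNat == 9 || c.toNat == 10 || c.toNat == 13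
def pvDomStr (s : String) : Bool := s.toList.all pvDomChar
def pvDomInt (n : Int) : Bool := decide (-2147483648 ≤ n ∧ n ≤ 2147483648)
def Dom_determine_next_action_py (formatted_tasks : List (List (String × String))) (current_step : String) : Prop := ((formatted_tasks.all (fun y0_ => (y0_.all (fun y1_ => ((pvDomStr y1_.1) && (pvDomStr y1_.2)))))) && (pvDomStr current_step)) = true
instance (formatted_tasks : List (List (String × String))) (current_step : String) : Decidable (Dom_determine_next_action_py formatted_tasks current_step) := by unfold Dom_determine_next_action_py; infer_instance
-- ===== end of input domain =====

-- B replaces A's empty-check plus four staged all/any scans by ONE max-of-severity-rank fold and a decode of that integer; objective: alternative (same O(n) cost).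

-- shared primitive: Python's task.get("status") on an assoc-list dict (first match, none = missing key)
def pvStatus (t : List (String × String)) : Option String :=
  (t.find? (fun p => p.1 == "status")).map (fun p => p.2)

-- ===== PORT A =====
def determine_next_action_py (formatted_tasks : List (List (String × String))) (current_step : String) : String :=
  if formatted_tasks.isEmpty then "final_response"
  else
    let all_completed := formatted_tasks.all (fun t => pvStatus t == some "completed")
    if all_completed then "final_response"
    else
      let any_active := formatted_tasks.any (fun t =>
        [some "pending", some "in_progress", some "retrying"].contains (pvStatus t))
      if any_active then "continue_execution"
      else
        let any_completed := formatted_tasks.any (fun t => pvStatus t == some "completed")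
        let any_failed := formatted_tasks.any (fun t => pvStatus t == some "failed")
        if any_completed then "final_response"
        else if any_failed then "final_response"
        else "continue_execution"

-- ===== PORT B =====
-- Source B's RANK dict; keys are the statuses (the Python lookup key task.get("status") may be None and then never matches, so the key type is Option String)
def pvRankDict : PySem.Dict (Option String) Int :=
  PySem.Dict.mk [(some "pending", 2), (some "in_progress", 2), (some "retrying", 2),
                 (some "completed", 1), (some "failed", 1)]

def determine_next_action_py_alt (formatted_tasks : List (List (String × String))) (current_step : String) : String :=
  let top := formatted_tasks.foldl
    (fun top t =>
      let r := PySem.Dict.getD pvRankDict (pvStatus t) 0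
      if r > top then r else top) (-1 : Int)
  if top == 2 || top == 0 then "continue_execution" else "final_response"

-- ===== PRECONDITION & SPEC =====
def Spec_determine_next_action_py (formatted_tasks : List (List (String × String))) (current_step : String) (out : String) : Prop := out = determine_next_action_py_alt formatted_tasks current_step
instance (formatted_tasks : List (List (String × String))) (current_step : String) (out : String) : Decidable (Spec_determine_next_action_py formatted_tasks current_step out) := by unfold Spec_determine_next_action_py; infer_instance

-- ===== CLAIM (what is proved, stated in full; the proofs are below) =====
def Claim_equal_determine_next_action_py : Prop := ∀ (formatted_tasks : List (List (String × String))) (current_step : String), Dom_determine_next_action_py formatted_tasks current_step → Spec_determine_next_action_py formatted_tasks current_step (determine_next_action_py formatted_tasks current_step)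

-- ===== LEMMAS AND PROOFS =====

-- the rank Source B assigns to one task, in closed form
def pvRank (t : List (String × String)) : Int :=
  if pvStatus t = some "pending" ∨ pvStatus t = some "in_progress" ∨ pvStatus t = some "retrying" then 2
  else if pvStatus t = some "completed" ∨ pvStatus t = some "failed" then 1
  else 0

theorem rank_eq (t : List (String × String)) :
    PySem.Dict.getD pvRankDict (pvStatus t) 0 = pvRank t := by
  unfold pvRank
  rcases hs : pvStatus t with _ | s
  · simp [pvRankDict, PySem.Dict.getD, PySem.Dict.get?]
  · by_cases h1 : "pending" = s
    · subst h1; simp [pvRankDict, PySem.Dict.getD, PySem.Dict.get?, List.find?]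
    · by_cases h2 : "in_progress" = s
      · subst h2; simp [pvRankDict, PySem.Dict.getD, PySem.Dict.get?, List.find?]
      · by_cases h3 : "retrying" = s
        · subst h3; simp [pvRankDict, PySem.Dict.getD, PySem.Dict.get?, List.find?]
        · by_cases h4 : "completed" = s
          · subst h4; simp [pvRankDict, PySem.Dict.getD, PySem.Dict.get?, List.find?]
          · by_cases h5 : "failed" = s
            · subst h5; simp [pvRankDict, PySem.Dict.getD, PySem.Dict.get?, List.find?]
            · have b1 : (("pending" : String) == s) = false := beq_eq_false_iff_ne.2 h1
              have b2 : (("in_progress" : String) == s) = false := beq_eq_false_iff_ne.2 h2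
              have b3 : (("retrying" : String) == s) = false := beq_eq_false_iff_ne.2 h3
              have b4 : (("completed" : String) == s) = false := beq_eq_false_iff_ne.2 h4
              have b5 : (("failed" : String) == s) = false := beq_eq_false_iff_ne.2 h5
              simp [pvRankDict, PySem.Dict.getD, PySem.Dict.get?, List.find?,
                b1, b2, b3, b4, b5, Ne.symm h1, Ne.symm h2, Ne.symm h3, Ne.symm h4, Ne.symm h5]

theorem rank_nonneg (t : List (String × String)) : 0 ≤ pvRank t := by
  unfold pvRank; split_ifs <;> omega

theorem rank_le_two (t : List (String × String)) : pvRank t ≤ 2 := by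
  unfold pvRank; split_ifs <;> omega

-- Source B's loop is a running max of pvRank
theorem top_eq_fold_max (ft : List (List (String × String))) :
    ft.foldl (fun top t =>
        let r := PySem.Dict.getD pvRankDict (pvStatus t) 0
        if r > top then r else top) (-1 : Int)
      = (ft.map pvRank).foldl max (-1) := by
  rw [List.foldl_map]
  apply PySem.List.foldl_congr_mem
  intro a t _
  rw [rank_eq]
  simp only [gt_iff_lt, max_def]
  split_ifs <;> omega

theorem determine_next_action_py_spec' (ft : List (List (String × String))) (cs : String) :
    determine_next_action_py ft cs = determine_next_action_py_alt ft cs := by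
  unfold determine_next_action_py determine_next_action_py_alt
  simp only [top_eq_fold_max]
  have hmem := PySem.List.foldl_max_mem (ft.map pvRank) (-1)
  have hle := PySem.List.le_foldl_max (ft.map pvRank) (-1)
  generalize hg : (ft.map pvRank).foldl max (-1 : Int) = top at hmem hle ⊢
  have htop_le : top ≤ 2 := by
    rcases hmem with h | h
    · omega
    · obtain ⟨t, _, hteq⟩ := List.mem_map.1 h
      have := rank_le_two t
      omega
  rcases hft : ft with _ | ⟨t0, rest⟩
  · subst hft
    simp at hg
    simp [← hg]
  · rw [← hft]
    have hne : ft.isEmpty = false := by rw [hft]; rfl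
    have ht0 : t0 ∈ ft := by rw [hft]; exact List.mem_cons_self
    have h0le : (0 : Int) ≤ top := by
      have := hle.2 (pvRank t0) (List.mem_map_of_mem ht0)
      have := rank_nonneg t0
      omega
    by_cases hact : ∃ t ∈ ft, pvRank t = 2
    · -- some active task: A's any_active fires, top = 2
      obtain ⟨t, ht, h2⟩ := hact
      have h2le : (2 : Int) ≤ top := h2 ▸ hle.2 _ (List.mem_map_of_mem ht)
      have htop2 : top = 2 := le_antisymm htop_le h2le
      have hany : (ft.any (fun t =>
          [some "pending", some "in_progress", some "retrying"].contains (pvStatus t))) = true := by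
        rw [List.any_eq_true]
        refine ⟨t, ht, ?_⟩
        unfold pvRank at h2
        split_ifs at h2 with h <;> first | (simp; tauto) | omega
      clear h2le
      have hall : (ft.all (fun t => pvStatus t == some "completed")) = false := by
        rw [List.all_eq_false]
        refine ⟨t, ht, ?_⟩
        unfold pvRank at h2
        split_ifs at h2 with h <;> first | (rcases h with h | h | h <;> simp [h]) | omega
      simp only [hne, hall, hany, htop2]; simp
    · -- no active task: every rank ≤ 1, so top ≤ 1
      have hle1 : ∀ t ∈ ft, pvRank t ≤ 1 := by
        intro t ht
        by_contra h
        exact hact ⟨t, ht, le_antisymm (rank_le_two t) (by omega)⟩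
      have htop1 : top ≤ 1 := by
        rcases hmem with h | h
        · omega
        · obtain ⟨t, ht, hteq⟩ := List.mem_map.1 h
          have := hle1 t ht
          omega
      have hany : (ft.any (fun t =>
          [some "pending", some "in_progress", some "retrying"].contains (pvStatus t))) = false := by
        rw [List.any_eq_false]
        intro t ht
        have := hle1 t ht
        unfold pvRank at this
        split_ifs at this with h <;> [omega; (simp; tauto); (simp; tauto)]
      by_cases hcf : ∃ t ∈ ft, pvRank t = 1
      · -- some completed/failed: top = 1, both sides final_response
        obtain ⟨t, ht, h1⟩ := hcf
        have h1le : (1 : Int) ≤ top := h1 ▸ hle.2 _ (List.mem_map_of_mem ht)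
        have htopv : top = 1 := le_antisymm htop1 h1le
        have hcor : (pvStatus t = some "completed" ∨ pvStatus t = some "failed") := by
          unfold pvRank at h1
          split_ifs at h1 with h h' <;> first | exact h' | omega
        by_cases hall : (ft.all (fun t => pvStatus t == some "completed")) = true
        · simp only [hne, hall, htopv]; simp
        · have hall' : (ft.all (fun t => pvStatus t == some "completed")) = false :=
            Bool.eq_false_iff.2 hall
          rcases hcor with h | h
          · have hc : (ft.any (fun t => pvStatus t == some "completed")) = true :=
              List.any_eq_true.2 ⟨t, ht, by simp [h]⟩
            simp only [hne, hall', hany, hc, htopv]; simp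
          · have hf : (ft.any (fun t => pvStatus t == some "failed")) = true :=
              List.any_eq_true.2 ⟨t, ht, by simp [h]⟩
            by_cases hc : (ft.any (fun t => pvStatus t == some "completed")) = true
            · simp only [hne, hall', hany, hc, htopv]; simp
            · have hc' : (ft.any (fun t => pvStatus t == some "completed")) = false :=
                Bool.eq_false_iff.2 hc
              simp only [hne, hall', hany, hc', hf, htopv]; simp
      · -- only unknown statuses: every rank = 0, top = 0, both continue_execution
        have h0 : ∀ t ∈ ft, pvRank t = 0 := by
          intro t ht
          have := hle1 t ht
          have := rank_nonneg t
          by_contra h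
          exact hcf ⟨t, ht, by omega⟩
        have htopv : top = 0 := by
          rcases hmem with h | h
          · have := h0 t0 ht0
            have := hle.2 (pvRank t0) (List.mem_map_of_mem ht0)
            omega
          · obtain ⟨t, ht, hteq⟩ := List.mem_map.1 h
            have := h0 t ht
            omega
        have hall : (ft.all (fun t => pvStatus t == some "completed")) = false := by
          rw [List.all_eq_false]
          refine ⟨t0, ht0, ?_⟩
          have := h0 t0 ht0
          unfold pvRank at this
          split_ifs at this with h h' <;> simp_all
        have hc : (ft.any (fun t => pvStatus t == some "completed")) = false := by
          rw [List.any_eq_false]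
          intro t ht
          have := h0 t ht
          unfold pvRank at this
          split_ifs at this <;> simp_all
        have hf : (ft.any (fun t => pvStatus t == some "failed")) = false := by
          rw [List.any_eq_false]
          intro t ht
          have := h0 t ht
          unfold pvRank at this
          split_ifs at this <;> simp_all
        simp only [hne, hall, hany, hc, hf, htopv]; simp

-- ===== VERDICT (by name: the statement is the Claim_ definition above) =====
theorem determine_next_action_py_spec : Claim_equal_determine_next_action_py := by
  intro ft cs _
  exact determine_next_action_py_spec' ft cs
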